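-- pv_equiv track=rewrite | github.com/ankitshah009/leetcode_python | graphs/1989-maximum_number_of_people_that_can_be_caught_in_tag.py | catchMaximumAmountofPeople
-- ===== SOURCE A (Python) =====
-- from typing import List
--
-- def catchMaximumAmountofPeople(team: List[int], dist: int) -> int:
--     """
--     Model as bipartite matching (conceptual, greedy is sufficient).
--     """
--     taggers = []
--     runners = []
--
--     for i, t in enumerate(team):
--         if t == 1:
--             taggers.append(i)
--         else:
--             runners.append(i)
--
--     # Greedy matching
--     catches = 0
--     used_runners = set()
--
--     for tagger in taggers:
--         for runner in runners:
--             if runner not in used_runners and abs(tagger - runner) <= dist: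
--                 catches += 1
--                 used_runners.add(runner)
--                 break
--
--     return catches
-- ===== SOURCE B (Python) =====
-- from typing import List
--
-- def catchMaximumAmountofPeople(team: List[int], dist: int) -> int:
--     # Two-pointer sweep over the (naturally sorted) tagger/runner index lists.
--     taggers = [i for i, t in enumerate(team) if t == 1]
--     runners = [i for i, t in enumerate(team) if t != 1]
--     catches = i = j = 0
--     while i < len(taggers) and j < len(runners):
--         if runners[j] < taggers[i] - dist:
--             j += 1
--         elif runners[j] <= taggers[i] + dist:
--             catches += 1
--             i += 1
--             j += 1
--         else:
--             i += 1
--     return catches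
-- ===== Notes on version B (the rewrite author's own statement) =====
-- stated objective: alternative
-- what changed: Replaces A's greedy that rescans the runner list (with a used-set) for every tagger by a single two-pointer sweep over the sorted tagger and runner index lists.
import Mathlib
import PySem

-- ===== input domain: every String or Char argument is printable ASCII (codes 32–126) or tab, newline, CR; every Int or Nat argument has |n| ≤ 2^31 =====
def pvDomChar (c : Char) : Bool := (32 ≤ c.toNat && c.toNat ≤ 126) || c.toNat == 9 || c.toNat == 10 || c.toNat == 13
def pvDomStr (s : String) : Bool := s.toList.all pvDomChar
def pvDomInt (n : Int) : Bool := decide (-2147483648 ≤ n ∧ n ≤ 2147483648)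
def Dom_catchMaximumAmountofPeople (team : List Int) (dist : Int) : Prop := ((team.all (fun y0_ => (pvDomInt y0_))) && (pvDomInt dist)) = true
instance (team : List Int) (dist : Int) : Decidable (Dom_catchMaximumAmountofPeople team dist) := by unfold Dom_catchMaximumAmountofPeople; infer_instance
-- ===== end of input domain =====

-- B replaces A's greedy per-tagger rescan of the runner list (with a used-set)
-- by a single two-pointer sweep over the sorted tagger/runner index lists; same result.

-- ===== PORT A =====
-- inner `for runner in runners: … break` — returns the first runner that is
-- unused and within dist, as Python's loop does
def pvFindRunner (runners : List Int) (used : PySem.Set Int) (tagger dist : Int) : Option Int :=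
  match runners with
  | [] => none
  | r :: rs =>
    if ¬ PySem.Set.contains used r ∧ |tagger - r| ≤ dist then some r
    else pvFindRunner rs used tagger dist

-- body of the outer `for tagger in taggers` loop: state = (catches, used_runners)
def pvTagStep (runners : List Int) (dist : Int) (st : Int × PySem.Set Int) (tagger : Int) :
    Int × PySem.Set Int :=
  match pvFindRunner runners st.2 tagger dist with
  | some r => (st.1 + 1, PySem.Set.add st.2 r)
  | none => st

def catchMaximumAmountofPeople (team : List Int) (dist : Int) : Int :=
  -- the splitting for-loop over enumerate(team), appending to taggers/runners
  let p := (PySem.List.enumerate team).foldl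
    (fun (acc : List Int × List Int) q =>
      if q.2 = 1 then (acc.1 ++ [q.1], acc.2) else (acc.1, acc.2 ++ [q.1]))
    ([], [])
  ((p.1.foldl (pvTagStep p.2 dist) (0, PySem.Set.empty)).1)

-- ===== PORT B =====
-- the while loop of Source B: i/j pointers become the remaining suffixes of the two lists
def pvTwoPtr (dist : Int) : List Int → List Int → Int
  | [], _ => 0
  | _ :: _, [] => 0
  | t :: ts, r :: rs =>
    if r < t - dist then pvTwoPtr dist (t :: ts) rs
    else if r ≤ t + dist then 1 + pvTwoPtr dist ts rs
    else pvTwoPtr dist ts (r :: rs)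
  termination_by ta ru => ta.length + ru.length

def catchMaximumAmountofPeople_alt (team : List Int) (dist : Int) : Int :=
  let taggers := (PySem.List.enumerate team).filterMap
    (fun q => if q.2 = 1 then some q.1 else none)
  let runners := (PySem.List.enumerate team).filterMap
    (fun q => if q.2 ≠ 1 then some q.1 else none)
  pvTwoPtr dist taggers runners

-- ===== PRECONDITION & SPEC =====
def Spec_catchMaximumAmountofPeople (team : List Int) (dist : Int) (out : Int) : Prop := out = catchMaximumAmountofPeople_alt team dist
instance (team : List Int) (dist : Int) (out : Int) : Decidable (Spec_catchMaximumAmountofPeople team dist out) := by unfold Spec_catchMaximumAmountofPeople; infer_instance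

-- ===== CLAIM (what is proved, stated in full; the proofs are below) =====
def Claim_equal_catchMaximumAmountofPeople : Prop := ∀ (team : List Int) (dist : Int), Dom_catchMaximumAmountofPeople team dist → Spec_catchMaximumAmountofPeople team dist (catchMaximumAmountofPeople team dist)

-- ===== LEMMAS AND PROOFS =====

-- A's splitting loop builds exactly the two filterMap lists B uses
lemma pvSplit_eq (l : List (Int × Int)) (a b : List Int) :
    l.foldl
      (fun (acc : List Int × List Int) q =>
        if q.2 = 1 then (acc.1 ++ [q.1], acc.2) else (acc.1, acc.2 ++ [q.1]))
      (a, b)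
    = (a ++ l.filterMap (fun q => if q.2 = 1 then some q.1 else none),
       b ++ l.filterMap (fun q => if q.2 ≠ 1 then some q.1 else none)) := by
  induction l generalizing a b with
  | nil => simp
  | cons q l ih =>
    by_cases h : q.2 = 1 <;> simp [h, ih]

-- "bad" runner for a tagger: A's inner test fails on it
lemma pvFindRunner_none (runners : List Int) (used : PySem.Set Int) (t dist : Int)
    (h : ∀ r ∈ runners, PySem.Set.contains used r = true ∨ r < t - dist ∨ t + dist < r) :
    pvFindRunner runners used t dist = none := by
  induction runners with
  | nil => rfl
  | cons r rs ih =>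
    have hr := h r (by simp)
    have hbad : ¬ (¬ PySem.Set.contains used r ∧ |t - r| ≤ dist) := by
      rcases hr with h1 | h2 | h3
      · exact fun hc => hc.1 h1
      · intro ⟨_, habs⟩; rw [abs_le] at habs; omega
      · intro ⟨_, habs⟩; rw [abs_le] at habs; omega
    simp only [pvFindRunner, if_neg hbad]
    exact ih (fun x hx => h x (by simp [hx]))

lemma pvFindRunner_first (pre : List Int) (r : Int) (post : List Int)
    (used : PySem.Set Int) (t dist : Int)
    (hpre : ∀ x ∈ pre, PySem.Set.contains used x = true ∨ x < t - dist ∨ t + dist < x)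
    (hused : PySem.Set.contains used r = false)
    (hlo : t - dist ≤ r) (hhi : r ≤ t + dist) :
    pvFindRunner (pre ++ r :: post) used t dist = some r := by
  induction pre with
  | nil =>
    have hgood : ¬ PySem.Set.contains used r ∧ |t - r| ≤ dist := by
      refine ⟨fun hc => by rw [hused] at hc; exact absurd hc (by simp), ?_⟩
      rw [abs_le]; omega
    simp only [List.nil_append, pvFindRunner, if_pos hgood]
  | cons x xs ih =>
    have hx := hpre x (by simp)
    have hbad : ¬ (¬ PySem.Set.contains used x ∧ |t - x| ≤ dist) := by
      rcases hx with h1 | h2 | h3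
      · exact fun hc => hc.1 h1
      · intro ⟨_, habs⟩; rw [abs_le] at habs; omega
      · intro ⟨_, habs⟩; rw [abs_le] at habs; omega
    simp only [List.cons_append, pvFindRunner, if_neg hbad]
    exact ih (fun y hy => hpre y (by simp [hy]))

-- main loop correspondence: A's greedy fold over the remaining taggers equals
-- B's two-pointer sweep over the not-yet-reached suffix `rest` of the runners
lemma pvMain (dist : Int) (R : List Int) (hR : R.Pairwise (· < ·)) :
    ∀ (taggers : List Int), taggers.Pairwise (· < ·) →
    ∀ (rest consumed : List Int) (used : PySem.Set Int) (c : Int),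
      R = consumed ++ rest →
      (∀ r ∈ rest, PySem.Set.contains used r = false) →
      (∀ r ∈ consumed, PySem.Set.contains used r = true ∨ ∀ t ∈ taggers, r < t - dist) →
      (taggers.foldl (pvTagStep R dist) (c, used)).1 = c + pvTwoPtr dist taggers rest := by
  intro taggers
  induction taggers with
  | nil => intro _ rest consumed used c _ _ _; simp [pvTwoPtr]
  | cons t ts ih =>
    intro htsort rest
    induction rest with
    | nil =>
      intro consumed used c hRsplit hrest hcons
      have hnone : pvFindRunner R used t dist = none := by
        apply pvFindRunner_none
        intro r hrmem
        rw [hRsplit, List.append_nil] at *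
        rcases hcons r hrmem with h1 | h2
        · exact Or.inl h1
        · exact Or.inr (Or.inl (h2 t (by simp)))
      simp only [List.foldl_cons, pvTagStep, hnone]
      have := ih htsort.of_cons [] consumed used c hRsplit (by simp)
        (fun r hr => (hcons r hr).imp id (fun h t' ht' => h t' (by simp [ht'])))
      rw [this]; cases ts <;> simp [pvTwoPtr]
    | cons r rs ihrest =>
      intro consumed used c hRsplit hrest hcons
      have hconsbad : ∀ x ∈ consumed,
          PySem.Set.contains used x = true ∨ x < t - dist ∨ t + dist < x := by
        intro x hx
        rcases hcons x hx with h1 | h2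
        · exact Or.inl h1
        · exact Or.inr (Or.inl (h2 t (by simp)))
      by_cases h1 : r < t - dist
      · -- dead runner: both sides skip it
        rw [pvTwoPtr, if_pos h1]
        apply ihrest (consumed ++ [r]) used c (by simp [hRsplit])
          (fun x hx => hrest x (by simp [hx]))
        intro x hx
        rcases List.mem_append.mp hx with hx | hx
        · rcases hcons x hx with ha | hb
          · exact Or.inl ha
          · exact Or.inr hb
        · simp at hx; subst hx
          refine Or.inr ?_
          intro t' ht'
          rcases List.mem_cons.mp ht' with rfl | ht'
          · exact h1
          · have : t < t' := (List.pairwise_cons.mp htsort).1 t' ht'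
            omega
      · by_cases h2 : r ≤ t + dist
        · -- match: A picks exactly r, B consumes both heads
          have hsome : pvFindRunner R used t dist = some r := by
            rw [hRsplit]
            exact pvFindRunner_first consumed r rs used t dist hconsbad
              (hrest r (by simp)) (by omega) h2
          simp only [List.foldl_cons, pvTagStep, hsome]
          have hrlt : ∀ x ∈ rs, r < x := by
            have : (consumed ++ r :: rs).Pairwise (· < ·) := hRsplit ▸ hR
            have := (List.pairwise_append.mp this).2.1
            exact (List.pairwise_cons.mp this).1
          have := ih htsort.of_cons rs (consumed ++ [r]) (PySem.Set.add used r) (c + 1)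
            (by simp [hRsplit])
            (by
              intro x hx
              have hxr : x ≠ r := by have := hrlt x hx; omega
              have hxu := hrest x (by simp [hx])
              simp only [← Bool.not_eq_true] at *
              intro hmem
              rw [PySem.Set.contains_iff _ _] at hmem
              rcases (PySem.Set.mem_add _ _ _).mp hmem with hm | hm
              · exact hxu ((PySem.Set.contains_iff _ _).mpr hm)
              · exact hxr hm)
            (by
              intro x hx
              rcases List.mem_append.mp hx with hx | hx
              · rcases hcons x hx with ha | hb
                · exact Or.inl (by
                    rw [PySem.Set.contains_iff _ _] at ha ⊢
                    exact (PySem.Set.mem_add _ _ _).mpr (Or.inl ha))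
                · exact Or.inr (fun t' ht' => hb t' (by simp [ht']))
              · simp at hx; subst hx
                exact Or.inl (by
                  rw [PySem.Set.contains_iff _ _]
                  exact (PySem.Set.mem_add _ _ _).mpr (Or.inr rfl)))
          rw [this, pvTwoPtr, if_neg h1, if_pos h2]
          omega
        · -- r (and every later runner) is beyond the window: tagger finds nobody
          have hnone : pvFindRunner R used t dist = none := by
            rw [hRsplit]
            apply pvFindRunner_none
            intro x hx
            rcases List.mem_append.mp hx with hx | hx
            · exact hconsbad x hx
            · rcases List.mem_cons.mp hx with rfl | hx
              · exact Or.inr (Or.inr (by omega))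
              · have : (consumed ++ r :: rs).Pairwise (· < ·) := hRsplit ▸ hR
                have h' := (List.pairwise_append.mp this).2.1
                have := (List.pairwise_cons.mp h').1 x hx
                exact Or.inr (Or.inr (by omega))
          simp only [List.foldl_cons, pvTagStep, hnone]
          have := ih htsort.of_cons (r :: rs) consumed used c hRsplit hrest
            (fun x hx => (hcons x hx).imp id (fun h t' ht' => h t' (by simp [ht'])))
          rw [this, pvTwoPtr, if_neg h1, if_neg h2]

-- the tagger/runner index lists are strictly increasing
lemma pvFilterMap_sorted (team : List Int) (f : Int × Int → Option Int)
    (hf : ∀ q : Int × Int, ∀ y ∈ f q, y = q.1) :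
    ((PySem.List.enumerate team).filterMap f).Pairwise (· < ·) := by
  have h := PySem.List.pairwise_lt_enumerate (xs := team) (s := 0)
  exact List.Pairwise.filterMap f
    (fun a b hab x hx y hy => by rw [hf a x hx, hf b y hy]; exact hab) h

-- ===== VERDICT (by name: the statement is the Claim_ definition above) =====
theorem catchMaximumAmountofPeople_spec : Claim_equal_catchMaximumAmountofPeople := by
  intro team dist _
  unfold Spec_catchMaximumAmountofPeople catchMaximumAmountofPeople catchMaximumAmountofPeople_alt
  rw [pvSplit_eq]
  simp only [List.nil_append]
  have hT := pvFilterMap_sorted team (fun q => if q.2 = 1 then some q.1 else none)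
    (fun q y hy => by by_cases h : q.2 = 1 <;> simp [h] at hy ; omega)
  have hR := pvFilterMap_sorted team (fun q => if q.2 ≠ 1 then some q.1 else none)
    (fun q y hy => by by_cases h : q.2 = 1 <;> simp [h] at hy ; omega)
  have := pvMain dist _ hR _ hT _ [] PySem.Set.empty 0 rfl
    (fun r _ => rfl) (by simp)
  simpa using this
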